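-- pv_equiv track=rewrite | github.com/MrHamdulay/csc3-capstone | examples/data/Assignment_4/dhsdea001/ndom.py | ndom_multiply
-- ===== SOURCE A (Python) =====
-- def ndom_multiply (a, b):
--
--     totala=0
--     a=str(a)
--     exp=len(a)
--     for x in a:
--         exp=exp-1
--         x=int(x)
--         totala +=(x*(6**exp))
--
--     totalb=0
--     b=str(b)
--     exp=len(b)
--     for x in b:
--         exp=exp-1
--         x=int(x)
--         totalb +=(x*(6**exp))
--
--     total = totala *totalb
--
--     quot=total
--     newtotal=""
--     while quot !=0:
--         rem = quot%6
--         quot =quot//6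
--         rem=str(rem)
--         newtotal=newtotal+rem
--     return(newtotal[::-1])
-- ===== SOURCE B (Python) =====
-- def ndom_multiply(a, b):
--     # Schoolbook base-6 multiplication on digit lists: multiply the two digit
--     # polynomials, then normalise with a single carry pass; the full decimal
--     # product integer is never formed.
--     def digits_lsb(s):
--         return [int(c) for c in str(s)][::-1]
--
--     def add_poly(p, q):
--         if not p:
--             return q
--         if not q:
--             return p
--         return [p[0] + q[0]] + add_poly(p[1:], q[1:])
--
--     def mul_poly(p, q):
--         if not p:
--             return []
--         return add_poly([p[0] * y for y in q], [0] + mul_poly(p[1:], q))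
--
--     coeffs = mul_poly(digits_lsb(a), digits_lsb(b))
--     out = []
--     carry = 0
--     for x in coeffs:
--         carry += x
--         out.append(carry % 6)
--         carry //= 6
--     while carry:
--         out.append(carry % 6)
--         carry //= 6
--     while out and out[-1] == 0:
--         out.pop()
--     return ''.join(str(d) for d in reversed(out))
-- ===== Notes on version B (the rewrite author's own statement) =====
-- stated objective: alternative
-- what changed: B multiplies the two base-6 digit lists directly by schoolbook polynomial convolution followed by one carry-propagation pass (then strips leading zeros), instead of A's convert-both-to-one-integer, integer multiply, repeated-divmod reconvert.
import Mathlib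
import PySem

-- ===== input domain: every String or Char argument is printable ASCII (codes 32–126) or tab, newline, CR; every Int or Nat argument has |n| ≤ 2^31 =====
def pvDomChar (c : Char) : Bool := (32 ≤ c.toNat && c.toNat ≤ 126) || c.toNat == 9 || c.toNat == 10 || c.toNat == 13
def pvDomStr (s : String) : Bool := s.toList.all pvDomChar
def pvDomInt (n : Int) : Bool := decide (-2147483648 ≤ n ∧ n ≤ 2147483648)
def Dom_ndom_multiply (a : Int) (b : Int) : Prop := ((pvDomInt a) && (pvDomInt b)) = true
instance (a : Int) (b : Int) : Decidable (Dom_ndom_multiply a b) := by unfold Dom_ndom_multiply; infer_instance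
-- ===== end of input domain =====

-- B multiplies the two base-6 digit lists directly (schoolbook polynomial convolution + one
-- carry pass, stripping leading zeros) instead of A's convert-to-integer / multiply / repeated
-- divmod reconversion (objective: alternative algorithm).

-- ===== PORT A =====

-- int(x) for a single digit character (exact on '0'..'9', the only chars str() of a
-- nonnegative int produces; Pre_ excludes negatives, where Python raises ValueError on '-')
def pvCharDigit (c : Char) : Int := (c.toNat : Int) - 48

-- A's for-loop: exp starts at len(s) and is decremented before each use; since exp always
-- equals the length of the remaining list, exp-1 ≥ 0 and 6**exp stays integral.
def pvPowLoop : List Char → Nat → Int → Int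
  | [], _, total => total
  | c :: rest, exp, total => pvPowLoop rest (exp - 1) (total + pvCharDigit c * 6 ^ (exp - 1))

-- A's while-loop: quot = total ≥ 0 whenever A returns (digits are ≥ 0), so the loop runs on
-- the Nat value; str(rem) for rem in 0..5 via PySem.Int.toStr
def pvDivLoopA (q : Nat) (acc : List Char) : List Char :=
  if q = 0 then acc else pvDivLoopA (q / 6) (acc ++ (PySem.Int.toStr ((q % 6 : Nat) : Int)).toList)
  decreasing_by exact Nat.div_lt_self (Nat.pos_of_ne_zero (by assumption)) (by omega)

def ndom_multiply (a : Int) (b : Int) : String :=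
  let sa := (PySem.Int.toStr a).toList
  let totala := pvPowLoop sa sa.length 0
  let sb := (PySem.Int.toStr b).toList
  let totalb := pvPowLoop sb sb.length 0
  let total := totala * totalb
  -- newtotal[::-1] is string reversal
  String.ofList (pvDivLoopA total.toNat []).reverse

-- ===== PORT B =====

-- digits_lsb(s): [int(c) for c in str(s)][::-1]
def pvDigitsLsb (s : List Char) : List Int := (s.map pvCharDigit).reverse

-- add_poly: elementwise sum, tail of the longer list kept
def pvAddPoly : List Int → List Int → List Int
  | [], q => q
  | p, [] => p
  | x :: p, y :: q => (x + y) :: pvAddPoly p q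

-- mul_poly: add_poly([p[0]*y for y in q], [0] + mul_poly(p[1:], q))
def pvMulPoly : List Int → List Int → List Int
  | [], _ => []
  | x :: p, q => pvAddPoly (q.map (fun y => x * y)) (0 :: pvMulPoly p q)

-- the trailing 'while carry:' loop; carry ≥ 0 whenever B returns (digits are ≥ 0),
-- so it runs on the Nat value (on a negative carry the Python loop never terminates)
def pvTail (q : Nat) : List Int :=
  if q = 0 then [] else ((q % 6 : Nat) : Int) :: pvTail (q / 6)
  decreasing_by exact Nat.div_lt_self (Nat.pos_of_ne_zero (by assumption)) (by omega)

-- the 'for x in coeffs:' carry loop, flowing into the trailing while-loop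
def pvCarryLoop : List Int → Int → List Int
  | [], c => pvTail c.toNat
  | x :: xs, c => PySem.Int.mod (c + x) 6 :: pvCarryLoop xs (PySem.Int.floordiv (c + x) 6)

-- 'while out and out[-1] == 0: out.pop()': drop trailing zeros
def pvStrip (l : List Int) : List Int := (l.reverse.dropWhile (· == 0)).reverse

def ndom_multiply_alt (a : Int) (b : Int) : String :=
  let coeffs := pvMulPoly (pvDigitsLsb (PySem.Int.toStr a).toList) (pvDigitsLsb (PySem.Int.toStr b).toList)
  let out := pvStrip (pvCarryLoop coeffs 0)
  PySem.Str.join "" (out.reverse.map PySem.Int.toStr)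

-- ===== PRECONDITION & SPEC =====
-- A raises ValueError (int('-')) on any negative argument; it returns on all a, b ≥ 0.
def Pre_ndom_multiply (a : Int) (b : Int) : Prop := 0 ≤ a ∧ 0 ≤ b
instance (a : Int) (b : Int) : Decidable (Pre_ndom_multiply a b) := by unfold Pre_ndom_multiply; infer_instance
def pvWitness_ndom_multiply : Int × Int := (25, 37)

def Spec_ndom_multiply (a : Int) (b : Int) (out : String) : Prop := out = ndom_multiply_alt a b
instance (a : Int) (b : Int) (out : String) : Decidable (Spec_ndom_multiply a b out) := by unfold Spec_ndom_multiply; infer_instance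

-- ===== CLAIM (what is proved, stated in full; the proofs are below) =====
def Claim_equal_ndom_multiply : Prop := ∀ (a : Int) (b : Int), Dom_ndom_multiply a b → Pre_ndom_multiply a b → Spec_ndom_multiply a b (ndom_multiply a b)

-- ===== LEMMAS AND PROOFS =====

-- positional (MSB-first) value of a digit string, as accumulated by A's power loops
def pvVal : List Char → Int
  | [] => 0
  | c :: rest => pvCharDigit c * 6 ^ rest.length + pvVal rest

theorem pvPowLoop_val (s : List Char) : ∀ t, pvPowLoop s s.length t = t + pvVal s := by
  induction s with
  | nil => intro t; simp [pvPowLoop, pvVal]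
  | cons c rest ih =>
    intro t
    show pvPowLoop rest (rest.length + 1 - 1) _ = _
    simp only [Nat.add_sub_cancel]
    rw [ih]
    simp [pvVal]; ring

-- LSB-first value of a coefficient list
def pvVL : List Int → Int
  | [] => 0
  | x :: xs => x + 6 * pvVL xs

theorem pvVL_add (p q : List Int) : pvVL (pvAddPoly p q) = pvVL p + pvVL q := by
  induction p generalizing q with
  | nil => simp [pvAddPoly, pvVL]
  | cons x p ih =>
    cases q with
    | nil => simp [pvAddPoly, pvVL]
    | cons y q => simp [pvAddPoly, pvVL, ih]; ring

theorem pvVL_smul (x : Int) (q : List Int) : pvVL (q.map (fun y => x * y)) = x * pvVL q := by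
  induction q with
  | nil => simp [pvVL]
  | cons y q ih => simp [pvVL, ih]; ring

theorem pvVL_mul (p q : List Int) : pvVL (pvMulPoly p q) = pvVL p * pvVL q := by
  induction p with
  | nil => simp [pvMulPoly, pvVL]
  | cons x p ih => simp [pvMulPoly, pvVL, pvVL_add, pvVL_smul, ih]; ring

theorem pvVL_append_singleton (l : List Int) (x : Int) :
    pvVL (l ++ [x]) = pvVL l + x * 6 ^ l.length := by
  induction l with
  | nil => simp [pvVL]
  | cons y l ih => simp [pvVL, ih]; ring

theorem pvVL_digitsLsb (s : List Char) : pvVL (pvDigitsLsb s) = pvVal s := by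
  induction s with
  | nil => simp [pvDigitsLsb, pvVL, pvVal]
  | cons c rest ih =>
    simp only [pvDigitsLsb, List.map, List.reverse_cons] at *
    rw [pvVL_append_singleton, ih]
    simp [pvVal]; ring

-- digits of str(n) for n ≥ 0 are '0'..'9'
theorem pvToDigitsCore_ge (fuel : Nat) : ∀ (n : Nat) (ds : List Char),
    (∀ c ∈ ds, 48 ≤ c.toNat) → ∀ c ∈ Nat.toDigitsCore 10 fuel n ds, 48 ≤ c.toNat := by
  induction fuel with
  | zero => intro n ds h c hc; simpa [Nat.toDigitsCore] using h c hc
  | succ fuel ih =>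
    intro n ds h c hc
    have hd : 48 ≤ ((n % 10).digitChar).toNat := by
      have : n % 10 < 10 := Nat.mod_lt _ (by omega)
      interval_cases h : n % 10 <;> decide
    rw [Nat.toDigitsCore] at hc
    by_cases h10 : n / 10 = 0
    · simp only [h10, if_true] at hc
      rcases List.mem_cons.mp hc with h1 | h2
      · subst h1; exact hd
      · exact h c h2
    · simp only [if_neg h10] at hc
      exact ih (n / 10) _ (by
        intro d hdm
        rcases List.mem_cons.mp hdm with h1 | h2
        · subst h1; exact hd
        · exact h d h2) c hc

theorem pvDigit_nonneg {a : Int} (ha : 0 ≤ a) :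
    ∀ c ∈ (PySem.Int.toStr a).toList, 0 ≤ pvCharDigit c := by
  intro c hc
  rw [PySem.Int.toList_toStr] at hc
  have : ¬ a < 0 := by omega
  simp only [PySem.Int.toChars, if_neg this] at hc
  have h48 : 48 ≤ c.toNat :=
    pvToDigitsCore_ge _ _ _ (by intro d hd; simp at hd) c hc
  simp only [pvCharDigit]
  omega

theorem pvAddPoly_nonneg {p q : List Int} (hp : ∀ x ∈ p, 0 ≤ x) (hq : ∀ x ∈ q, 0 ≤ x) :
    ∀ x ∈ pvAddPoly p q, 0 ≤ x := by
  induction p generalizing q with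
  | nil => simpa [pvAddPoly] using hq
  | cons a p ih =>
    cases q with
    | nil => simpa [pvAddPoly] using hp
    | cons b q =>
      intro x hx
      rcases List.mem_cons.mp hx with h1 | h2
      · subst h1
        have := hp a (by simp); have := hq b (by simp); omega
      · exact ih (fun y hy => hp y (by simp [hy])) (fun y hy => hq y (by simp [hy])) x h2

theorem pvMulPoly_nonneg {p q : List Int} (hp : ∀ x ∈ p, 0 ≤ x) (hq : ∀ x ∈ q, 0 ≤ x) :
    ∀ x ∈ pvMulPoly p q, 0 ≤ x := by
  induction p with
  | nil => simp [pvMulPoly]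
  | cons a p ih =>
    simp only [pvMulPoly]
    apply pvAddPoly_nonneg
    · intro x hx
      rcases List.mem_map.mp hx with ⟨y, hy, rfl⟩
      exact mul_nonneg (hp a (by simp)) (hq y hy)
    · intro x hx
      rcases List.mem_cons.mp hx with h1 | h2
      · omega
      · exact ih (fun y hy => hp y (by simp [hy])) x h2

theorem pvVL_nonneg {l : List Int} (h : ∀ x ∈ l, 0 ≤ x) : 0 ≤ pvVL l := by
  induction l with
  | nil => simp [pvVL]
  | cons x xs ih =>
    have := h x (by simp)
    have := ih (fun y hy => h y (by simp [hy]))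
    simp only [pvVL]; omega

theorem pvTail_eq_nil_iff (q : Nat) : pvTail q = [] ↔ q = 0 := by
  constructor
  · intro h
    by_contra hq
    rw [pvTail, if_neg hq] at h
    simp at h
  · intro h; subst h; rw [pvTail]; simp

-- the recursive shape of the trailing-zero strip, used by the carry induction
def pvStripRec : List Int → List Int
  | [] => []
  | x :: xs => if pvStripRec xs = [] then (if x = 0 then [] else [x]) else x :: pvStripRec xs

theorem pvStripRec_cons (x : Int) (xs : List Int) :
    pvStripRec (x :: xs) =
      if pvStripRec xs = [] then (if x = 0 then [] else [x]) else x :: pvStripRec xs := rfl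

theorem pvDropWhile_append (p : Int → Bool) (l : List Int) (x : Int) :
    List.dropWhile p (l ++ [x]) =
      if List.dropWhile p l = [] then (if p x then [] else [x]) else List.dropWhile p l ++ [x] := by
  induction l with
  | nil => cases hpx : p x <;> simp [List.dropWhile, hpx]
  | cons y l ih =>
    by_cases hy : p y
    · simpa [List.dropWhile, hy] using ih
    · simp [List.dropWhile, hy]

theorem pvStrip_eq_rec (l : List Int) : pvStrip l = pvStripRec l := by
  induction l with
  | nil => rfl
  | cons x xs ih =>
    have hrev : pvStrip (x :: xs) = (List.dropWhile (· == 0) (xs.reverse ++ [x])).reverse := by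
      simp [pvStrip]
    rw [hrev, pvDropWhile_append]
    by_cases h : List.dropWhile (· == 0) xs.reverse = []
    · have hx : pvStripRec xs = [] := by
        rw [← ih]; unfold pvStrip; rw [h]; rfl
      rw [if_pos h]
      by_cases hx0 : x = 0
      · simp [pvStripRec, hx, hx0]
      · simp [pvStripRec, hx, hx0]
    · obtain ⟨a, l, hrec⟩ : ∃ a l, pvStripRec xs = a :: l := by
        cases hxx : pvStripRec xs with
        | nil =>
          exfalso
          apply h
          have hnil : pvStrip xs = [] := by rw [ih, hxx]
          unfold pvStrip at hnil
          simpa using congrArg List.reverse hnil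
        | cons a l => exact ⟨a, l, rfl⟩
      rw [if_neg h]
      have hlhs : (List.dropWhile (· == 0) xs.reverse ++ [x]).reverse = x :: pvStrip xs := by
        simp [pvStrip]
      rw [hlhs, ih, hrec]
      simp [pvStripRec, hrec]

theorem pvStripRec_pvTail (q : Nat) : pvStripRec (pvTail q) = pvTail q := by
  induction q using Nat.strong_induction_on with
  | _ q ih =>
    by_cases h : q = 0
    · subst h; rw [pvTail]; simp [pvStripRec]
    · rw [pvTail, if_neg h]
      cases ht : pvTail (q / 6) with
      | nil =>
        have hq6 : q / 6 = 0 := (pvTail_eq_nil_iff _).mp ht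
        have hm : q % 6 ≠ 0 := by omega
        have hni : ¬ ((q % 6 : Nat) : Int) = 0 := fun hcon => hm (Int.natCast_eq_zero.mp hcon)
        rw [pvStripRec_cons]
        simp only [pvStripRec]
        rw [if_pos trivial, if_neg hni]
      | cons a l =>
        have hrec := ih (q / 6) (Nat.div_lt_self (Nat.pos_of_ne_zero h) (by omega))
        rw [ht] at hrec
        rw [pvStripRec_cons, hrec, if_neg (by simp)]

-- core carry-correctness: stripping the carry loop's output yields the canonical
-- base-6 digits (LSB-first) of the total value
theorem pvCarry_core (cs : List Int) : ∀ c : Int, (∀ x ∈ cs, 0 ≤ x) → 0 ≤ c →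
    pvStripRec (pvCarryLoop cs c) = pvTail (pvVL cs + c).toNat := by
  induction cs with
  | nil =>
    intro c _ _
    simp only [pvCarryLoop, pvVL, zero_add]
    exact pvStripRec_pvTail c.toNat
  | cons x xs ih =>
    intro c hnn hc
    have hx : 0 ≤ x := hnn x (by simp)
    have hs : 0 ≤ c + x := by omega
    have hmod : PySem.Int.mod (c + x) 6 = (c + x) % 6 := PySem.Int.mod_eq_emod_of_pos (by omega)
    have hdiv : PySem.Int.floordiv (c + x) 6 = (c + x) / 6 := PySem.Int.floordiv_eq_ediv_of_pos (by omega)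
    have hd0 : 0 ≤ (c + x) % 6 := Int.emod_nonneg _ (by omega)
    have hd6 : (c + x) % 6 < 6 := Int.emod_lt_of_pos _ (by omega)
    have hc' : 0 ≤ (c + x) / 6 := Int.ediv_nonneg hs (by omega)
    have hVL : 0 ≤ pvVL xs := pvVL_nonneg (fun y hy => hnn y (by simp [hy]))
    set d := (c + x) % 6 with hd
    set c' := (c + x) / 6 with hc'def
    have hsum : x + c = d + 6 * c' := by
      have := Int.emod_add_mul_ediv (c + x) 6
      omega
    have hrec : pvStripRec (pvCarryLoop xs c') = pvTail (pvVL xs + c').toNat :=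
      ih c' (fun y hy => hnn y (by simp [hy])) hc'
    simp only [pvCarryLoop, hmod, hdiv, pvVL]
    cases hMt : pvTail (pvVL xs + c').toNat with
    | nil =>
      have hMz : (pvVL xs + c').toNat = 0 := (pvTail_eq_nil_iff _).mp hMt
      rw [hMt] at hrec
      rw [pvStripRec_cons, hrec, if_pos (rfl : ([] : List Int) = [])]
      by_cases hdz : d = 0
      · rw [if_pos hdz]
        have hz : (x + 6 * pvVL xs + c).toNat = 0 := by omega
        rw [hz, pvTail]
        simp
      · rw [if_neg hdz]
        have hn : (x + 6 * pvVL xs + c).toNat ≠ 0 := by omega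
        rw [pvTail, if_neg hn]
        have h1 : (x + 6 * pvVL xs + c).toNat % 6 = d.toNat := by omega
        have h2 : (x + 6 * pvVL xs + c).toNat / 6 = 0 := by omega
        rw [h1, h2, pvTail, if_pos rfl]
        simp
        omega
    | cons a l =>
      rw [hMt] at hrec
      rw [pvStripRec_cons, hrec, if_neg (by simp)]
      have hMnz : (pvVL xs + c').toNat ≠ 0 := by
        intro hc0
        rw [(pvTail_eq_nil_iff _).mpr hc0] at hMt
        simp at hMt
      have hn : (x + 6 * pvVL xs + c).toNat ≠ 0 := by omega
      rw [pvTail, if_neg hn]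
      have h1 : (x + 6 * pvVL xs + c).toNat % 6 = d.toNat := by omega
      have h2 : (x + 6 * pvVL xs + c).toNat / 6 = (pvVL xs + c').toNat := by omega
      rw [h1, h2, hMt]
      simp
      omega

-- A's divmod loop emits exactly the chars of the canonical digits, LSB-first
theorem pvDivLoopA_flat (q : Nat) : ∀ acc,
    pvDivLoopA q acc = acc ++ (pvTail q).flatMap (fun d => (PySem.Int.toStr d).toList) := by
  induction q using Nat.strong_induction_on with
  | _ q ih =>
    intro acc
    by_cases h : q = 0
    · subst h; rw [pvDivLoopA, pvTail]; simp
    · rw [pvDivLoopA, if_neg h, pvTail, if_neg h,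
        ih (q / 6) (Nat.div_lt_self (Nat.pos_of_ne_zero h) (by omega))]
      simp

theorem pvTail_digits (q : Nat) : ∀ d ∈ pvTail q, 0 ≤ d ∧ d < 6 := by
  induction q using Nat.strong_induction_on with
  | _ q ih =>
    intro d hd
    by_cases h : q = 0
    · subst h; rw [pvTail] at hd; simp at hd
    · rw [pvTail, if_neg h] at hd
      rcases List.mem_cons.mp hd with h1 | h2
      · subst h1
        have : q % 6 < 6 := Nat.mod_lt _ (by omega)
        omega
      · exact ih (q / 6) (Nat.div_lt_self (Nat.pos_of_ne_zero h) (by omega)) d h2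

theorem pvDigitChars_rev (d : Int) (h0 : 0 ≤ d) (h : d < 6) :
    ((PySem.Int.toStr d).toList).reverse = (PySem.Int.toStr d).toList := by
  interval_cases d <;> decide

theorem pvFlatMap_rev (L : List Int) (h : ∀ d ∈ L, 0 ≤ d ∧ d < 6) :
    (L.flatMap (fun d => (PySem.Int.toStr d).toList)).reverse =
      L.reverse.flatMap (fun d => (PySem.Int.toStr d).toList) := by
  induction L with
  | nil => simp
  | cons x xs ih =>
    simp only [List.flatMap_cons, List.reverse_append, List.reverse_cons, List.flatMap_append,
      List.flatMap_cons, List.flatMap_nil, List.append_nil]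
    rw [ih (fun d hd => h d (by simp [hd])),
      pvDigitChars_rev x (h x (by simp)).1 (h x (by simp)).2]

-- ''.join over the list of one-digit strings concatenates their characters
theorem pvJoinNil_flatten (ps : List (List Char)) : PySem.Chars.join [] ps = ps.flatten := by
  induction ps with
  | nil => simp [PySem.Chars.join_nil]
  | cons p ps ih =>
    cases ps with
    | nil => simp [PySem.Chars.join_singleton]
    | cons q rest =>
      rw [PySem.Chars.join_cons_cons, ih]
      simp

theorem pvJoin_flat (L : List Int) :
    PySem.Str.join "" (L.map PySem.Int.toStr) =
      String.ofList (L.flatMap (fun d => (PySem.Int.toStr d).toList)) := by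
  simp only [PySem.Str.join]
  congr 1
  rw [show ("" : String).toList = [] from rfl, pvJoinNil_flatten, List.map_map]
  simp [List.flatMap_def, Function.comp_def, PySem.Int.toList_toStr]

theorem ndom_multiply_eq (a b : Int) (ha : 0 ≤ a) (hb : 0 ≤ b) :
    ndom_multiply a b = ndom_multiply_alt a b := by
  unfold ndom_multiply ndom_multiply_alt
  simp only [pvPowLoop_val, zero_add]
  set sa := (PySem.Int.toStr a).toList with hsa
  set sb := (PySem.Int.toStr b).toList with hsb
  have hda : ∀ x ∈ pvDigitsLsb sa, 0 ≤ x := by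
    intro x hx
    rcases List.mem_reverse.mp hx with hx'
    rcases List.mem_map.mp hx' with ⟨c, hc, rfl⟩
    exact pvDigit_nonneg ha c hc
  have hdb : ∀ x ∈ pvDigitsLsb sb, 0 ≤ x := by
    intro x hx
    rcases List.mem_reverse.mp hx with hx'
    rcases List.mem_map.mp hx' with ⟨c, hc, rfl⟩
    exact pvDigit_nonneg hb c hc
  have hcoef := pvMulPoly_nonneg hda hdb
  have hval : pvVL (pvMulPoly (pvDigitsLsb sa) (pvDigitsLsb sb)) = pvVal sa * pvVal sb := by
    rw [pvVL_mul, pvVL_digitsLsb, pvVL_digitsLsb]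
  rw [pvStrip_eq_rec, pvCarry_core _ 0 hcoef le_rfl, add_zero, hval]
  rw [pvDivLoopA_flat, List.nil_append, pvJoin_flat]
  congr 1
  exact pvFlatMap_rev _ (pvTail_digits _)

-- ===== VERDICT (by name: the statement is the Claim_ definition above) =====
theorem ndom_multiply_spec : Claim_equal_ndom_multiply := by
  intro a b _ hpre
  exact ndom_multiply_eq a b hpre.1 hpre.2
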